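import PySem
-- The `pysem` simp set (registered in PySemCore, members tagged at the end of PySem.lean) is usable from a downstream file: the
-- loop-shape lemma and a Str/Chars bridge are found by the set name alone. Compiled in the production Lean image (Mathlib present) by
-- the in-image prelude test; the core-only pv_pysem_transparent.lean cannot import PySem.
example (l acc : List Int) (f : Int → Int) : l.foldl (fun acc x => acc ++ [f x]) acc = acc ++ l.map f := by simp only [pysem]
example (s : String) : (PySem.Str.lower s).toList = PySem.Chars.lower s.toList := by simp only [pysem]
-- the set composes with the default simp set and local facts: pyGet? at an in-range natural index is the element
example (xs : List Int) (i : Nat) (h : i < xs.length) : PySem.List.pyGet? xs (i : Int) = some xs[i] := by simp [pysem, h]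
-- lemma pack 4: numeral negative indices / slice bounds (no_index OfNat forms), s[::-1], 'sub in s', dict double insert — found by the set name alone
example (xs : List Int) (d : Int) (h : 2 ≤ xs.length) : PySem.List.pyGetD xs (-2) d = xs[xs.length - 2]'(by omega) := by simp [pysem, h]
example (xs : List Int) : PySem.List.slice xs none (some (-3)) = xs.take (xs.length - 3) := by simp [pysem]
example (s : List Char) : PySem.Chars.slice? s none none (-1) = some s.reverse := by simp only [pysem]
example (s : List Char) : PySem.Chars.isIn ['a', 'b'] s = true ↔ ['a', 'b'] <:+: s := by simp only [pysem]
example (d : PySem.Dict Int Int) : (d.insert 1 2).insert 1 3 = d.insert 1 3 := by simp only [pysem]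
example (a b : Int) : PySem.Int.mod a b = 0 ↔ b ∣ a := by simp only [pysem]
example (xs : List Int) : PySem.List.slice xs none (some (-1)) = xs.dropLast := by simp only [pysem]
example (xs : List Int) : PySem.List.pyGet? xs (-1) = xs.getLast? := by simp only [pysem]
example (xs : List Int) (d : Int) (h : 2 ≤ xs.length) : PySem.List.pyGetD xs (-2) d = xs[xs.length - 2]'(by omega) := by rw [PySem.List.pyGetD_neg_ofNat xs 2 d (by omega) h]
example (xs : List Int) (d : Int) (h : 0 < xs.length) : PySem.List.pyGetD xs (-1) d = xs[xs.length - 1]'(by omega) := by rw [PySem.List.pyGetD_neg_ofNat xs 1 d (by omega) (by omega)]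
-- the most common idiom keeps its normal form (pyGetD_eq_getElem wins at the root)
example (xs : List Int) (i : Int) (d : Int) (h0 : 0 ≤ i) (h1 : i < xs.length) : PySem.List.pyGetD xs i d = xs[i.toNat]'(by omega) := by simp [pysem, h0, h1]
example (d : PySem.Dict Int Int) (h : d.contains 5 = false) : (d.setdefault 5 1).get? 5 = some 1 := by simp [pysem, h]
-- from-form numerals normalise too (slice_some_none leaves clampIdx, clampIdx_neg_ofNat finishes), insert keeps len + 1, numeral insert position
example (xs : List Int) : PySem.List.slice xs (some (-2)) none = xs.drop (xs.length - 2) := by simp [pysem]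
example (xs : List Int) (n : Nat) (v : Int) : (PySem.List.insert xs (n : Int) v).length = xs.length + 1 := by simp [pysem]
example (xs : List Int) (v : Int) (h : 2 ≤ xs.length) : PySem.List.insert xs 2 v = xs.take 2 ++ v :: xs.drop 2 := by simp [pysem, h]
example (xs : List Int) (v : Int) : PySem.List.insert xs (PySem.List.len xs) v = xs ++ [v] := by simp only [pysem]
-- setdefault with NO containment fact must not send simp into the contains/isSome cycle; literal-divisor % == 0 reaches divisibility
example (d : PySem.Dict Int Int) (k v : Int) (f : PySem.Dict Int Int → Int) (hf : f (d.setdefault k v) = 3) : f (d.setdefault k v) + 0 = 3 := by simp [pysem, hf]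
example (d : PySem.Dict Int Int) (k : Int) (h : d.contains k = false) : d.get? k = none := by simp [pysem, h]
example (a : Int) : PySem.Int.mod a 2 = 0 ↔ 2 ∣ a := by simp [pysem]
-- with the definitional unfolders (pyRange_one, Set.ofList_eq_foldl/update_eq_foldl, sorted_eq_foldl_insertBy, Dict.getD_eq_get?_getD, …) kept OUT of
-- the set, 'simp [pysem]' is no weaker than 'simp' and the lemmas about each primitive get to fire:
example (a b x : Int) : x ∈ PySem.List.pyRange a b 1 ↔ a ≤ x ∧ x < b := by simp [pysem]
example (xs : List Int) : (PySem.List.sorted xs (fun x => x) false).length = xs.length := by simp [pysem]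
example (xs : List Int) (y : Int) : y ∈ PySem.Set.ofList xs ↔ y ∈ xs := by simp [pysem]
example (s : PySem.Set Int) (xs : List Int) (y : Int) : y ∈ PySem.Set.update s xs ↔ y ∈ s ∨ y ∈ xs := by simp only [pysem]
example (d : PySem.Dict Int Int) (k v : Int) : (d.insert k v).getD k 0 = v := by simp only [pysem]
example (xs : List Int) (x : Int) : x ∈ PySem.List.sorted xs (fun y => y) false ↔ x ∈ xs := by simp only [pysem]
example (d : PySem.Dict Int Int) (k : Int) (h : k ∉ d.keys) : d.contains k = false := by simp [pysem, h]
-- pack 5 primitives: kernel-transparent (decide) and their lemmas reachable by the set name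
example : PySem.Int.bitLength 1000 = 10 ∧ PySem.Int.bitCount (-7) = 3 := by decide
example (m : Nat) (h : 0 < m) : PySem.Int.bitLength (m : Int) = PySem.Int.bitLength ((m / 2 : Nat) : Int) + 1 := by simp only [pysem, h]
example : PySem.List.combinations [1, 2, 3] 2 = [[1, 2], [1, 3], [2, 3]] := by decide
example (xs : List Int) : PySem.List.combinations xs 1 = xs.map (fun x => [x]) := by simp only [pysem]
example (s sub : List Char) : PySem.Chars.findFrom s sub 0 none = PySem.Chars.find s sub := by simp only [pysem]
example : PySem.Chars.findFrom "hello".toList "l".toList 3 = 3 ∧ PySem.Chars.split₀Max " a b ".toList 1 = ["a".toList, "b ".toList] := by decide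
example : PySem.Int.ofStrBase? " -0x1A " 0 = some (-26) ∧ PySem.Int.ofStrBase? "010" 0 = none ∧ PySem.Int.ofStrBase? "z_z" 36 = some 1295 := by decide
example : PySem.Chars.rfind "abab".toList "ab".toList = 2 ∧ PySem.Chars.rfindFrom "abab".toList "ab".toList 0 (some 3) = 0 ∧ ("ab".toList < "b".toList) := by decide
example : PySem.Int.band (-13) 255 = 243 ∧ PySem.Int.bor 6 (-7) = -1 ∧ PySem.Int.bxor (-1) (-7) = 6 := by decide
example (m n : Nat) : PySem.Int.band m n = ((m &&& n : Nat) : Int) := by simp only [pysem]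
-- pack 6: 'cite, don't re-derive' bridge lemmas reachable by the set name (comprehension indexing at any Int index, numeral index, 0/1-sum as a
-- count, sign reflection of //), maxD's order fact by name, the new primitives kernel-transparent; the root normal form of xs[i] above is unchanged
example (xs : List Int) (f : Int → Int) (i : Int) : PySem.List.pyGetD (xs.map f) i (f 0) = f (PySem.List.pyGetD xs i 0) := by simp only [pysem]
example (xs : List Int) (d : Int) : PySem.List.pyGetD xs 2 d = xs.getD 2 d := by simp only [pysem]
example (f : Nat → Int) (n i : Nat) (h : i < n) : ((List.range n).map f).getD i 0 = f i := by simp only [pysem, h]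
example (p : Int → Bool) (xs : List Int) : (xs.map (fun x => if p x then (1 : Int) else 0)).sum = xs.countP p := by simp only [pysem]
example (a b : Int) : PySem.Int.floordiv (-a) (-b) = PySem.Int.floordiv a b := by simp only [pysem]
-- (generic κ: this file imports only Mathlib.Order.Defs.LinearOrder via PySem, so Int's LinearOrder instance is not in scope here; ports import Mathlib)
example {κ : Type} [LinearOrder κ] (xs : List κ) (y d : κ) (h : y ∈ xs) : y ≤ PySem.List.maxD xs (fun x => x) d := PySem.List.le_maxD_id xs d y h
example {κ : Type} [LinearOrder κ] (x d : κ) (t : List κ) : PySem.List.maxD (x :: t) (fun y => y) d = t.foldl max x := by simp only [pysem]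
example : PySem.List.permutations [1, 2, 3] 2 = [[1, 2], [1, 3], [2, 1], [2, 3], [3, 1], [3, 2]] ∧ PySem.Int.powMod 2 10 1000 = 24 ∧ PySem.List.bisectLeft [1, 2, 2, 4] 2 = 1 := by decide
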